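-- pv_equiv track=rewrite | github.com/jpbruneton/NewtonMaxwell | game_env.py | rename_ai
-- ===== SOURCE A (Python) =====
-- def rename_ai(formula):
--     scalar_numbers = formula.count('A')
--
--     if scalar_numbers >0:
--         neweq = ''
--         A_count = 0
--         for char in formula:
--             if char == 'A':
--                 neweq += 'A' + str(A_count)
--                 A_count += 1
--             else:
--                 neweq += char
--
--         return neweq, scalar_numbers
--
--     else:
--         return formula, scalar_numbers
-- ===== SOURCE B (Python) =====
-- def rename_ai(formula):
--     parts = formula.split('A')
--     scalar_numbers = len(parts) - 1
--     if scalar_numbers == 0: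
--         return formula, scalar_numbers
--     return parts[0] + ''.join('A' + str(i) + p for i, p in enumerate(parts[1:])), scalar_numbers
-- ===== Notes on version B (the rewrite author's own statement) =====
-- stated objective: alternative
-- what changed: B replaces A's char-by-char loop with a running counter by splitting the formula on 'A' once and rejoining the parts with 'A'+index prefixes via enumerate/join.
import Mathlib
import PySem

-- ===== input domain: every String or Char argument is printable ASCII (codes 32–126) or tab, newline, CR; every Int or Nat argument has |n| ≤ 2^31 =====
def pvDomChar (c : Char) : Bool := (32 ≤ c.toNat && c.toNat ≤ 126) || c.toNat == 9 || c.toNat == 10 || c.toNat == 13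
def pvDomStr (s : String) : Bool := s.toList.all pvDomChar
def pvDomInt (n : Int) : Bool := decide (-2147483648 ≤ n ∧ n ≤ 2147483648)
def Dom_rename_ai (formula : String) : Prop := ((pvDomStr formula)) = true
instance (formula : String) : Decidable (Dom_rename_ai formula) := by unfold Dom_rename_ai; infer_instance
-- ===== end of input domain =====

-- B rebuilds the string from formula.split('A') in one pass instead of A's
-- char-by-char scan with a running counter; objective: alternative decomposition.

-- ===== PORT A =====
-- the loop 'for char in formula' of A: accumulator neweq (as chars) and A_count
def renameLoopA : List Char → List Char → Int → List Char
  | [], acc, _ => acc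
  | c :: cs, acc, n =>
    if c = 'A' then renameLoopA cs (acc ++ 'A' :: PySem.Int.toChars n) (n + 1)
    else renameLoopA cs (acc ++ [c]) n

def rename_ai (formula : String) : String × Int :=
  let scalar_numbers : Int := (PySem.Str.count formula "A" : Int)
  if scalar_numbers > 0 then
    (String.ofList (renameLoopA formula.toList [] 0), scalar_numbers)
  else (formula, scalar_numbers)

-- ===== PORT B =====
-- hand port of formula.split('A'): exact for Python's str.split with a
-- ONE-character separator — cut at every occurrence, keeping empty pieces
def splitA : List Char → List (List Char)
  | [] => [[]]
  | c :: cs =>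
    match splitA cs with
    | [] => [[]]
    | p :: ps => if c = 'A' then [] :: p :: ps else (c :: p) :: ps

-- ''.join('A' + str(i) + p for i, p in enumerate(parts[1:])), index starting at n
def joinTail : Int → List (List Char) → List Char
  | _, [] => []
  | n, p :: ps => 'A' :: (PySem.Int.toChars n ++ p ++ joinTail (n + 1) ps)

def rename_ai_alt (formula : String) : String × Int :=
  let parts := splitA formula.toList
  let scalar_numbers : Int := (parts.length : Int) - 1
  if scalar_numbers = 0 then (formula, scalar_numbers)
  else (String.ofList (parts.headI ++ joinTail 0 parts.tail), scalar_numbers)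

-- ===== PRECONDITION & SPEC =====
def Spec_rename_ai (formula : String) (out : String × Int) : Prop := out = rename_ai_alt formula
instance (formula : String) (out : String × Int) : Decidable (Spec_rename_ai formula out) := by unfold Spec_rename_ai; infer_instance

-- ===== CLAIM (what is proved, stated in full; the proofs are below) =====
def Claim_equal_rename_ai : Prop := ∀ (formula : String), Dom_rename_ai formula → Spec_rename_ai formula (rename_ai formula)

-- ===== LEMMAS AND PROOFS =====
lemma splitA_ne_nil (l : List Char) : splitA l ≠ [] := by
  cases l with
  | nil => simp [splitA]
  | cons c cs =>
    simp only [splitA]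
    rcases h : splitA cs with _ | ⟨p, ps⟩
    · simp
    · split_ifs <;> simp

lemma length_splitA (l : List Char) : (splitA l).length = l.count 'A' + 1 := by
  induction l with
  | nil => simp [splitA]
  | cons c cs ih =>
    simp only [splitA]
    rcases h : splitA cs with _ | ⟨p, ps⟩
    · exact absurd h (splitA_ne_nil cs)
    · rw [h] at ih
      simp only [List.length_cons] at ih
      by_cases hc : c = 'A' <;> simp [hc, List.count_cons] <;> omega

lemma countgo_A (fuel : Nat) : ∀ (l : List Char) (acc : Nat), l.length ≤ fuel →
    PySem.Chars.count.go ['A'] fuel l acc = acc + l.count 'A' := by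
  induction fuel with
  | zero =>
    intro l acc h
    have : l = [] := List.eq_nil_of_length_eq_zero (Nat.le_zero.mp h)
    subst this
    simp [PySem.Chars.count.go]
  | succ f ih =>
    intro l acc h
    cases l with
    | nil => simp [PySem.Chars.count.go]
    | cons c cs =>
      rw [PySem.Chars.count.go]
      by_cases hc : c = 'A'
      · subst hc
        rw [if_pos (by simp [List.isPrefixOf])]
        simp only [List.length_singleton, List.drop_one, List.tail_cons]
        rw [ih cs (acc + 1) (by simp at h; omega)]
        simp [List.count_cons]
        omega
      · have hp : (List.isPrefixOf ['A'] (c :: cs)) = false := by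
          simp [List.isPrefixOf]
          exact fun hh => absurd hh.symm hc
        rw [hp]
        simp only [Bool.false_eq_true, if_false]
        rw [ih cs acc (by simpa using Nat.le_of_succ_le_succ h)]
        simp [List.count_cons, hc]

lemma strcount_A (formula : String) :
    PySem.Str.count formula "A" = formula.toList.count 'A' := by
  have : ("A" : String).toList = ['A'] := rfl
  rw [PySem.Str.count, this, PySem.Chars.count]
  simp only [List.isEmpty_cons, Bool.false_eq_true, if_false]
  rw [countgo_A _ _ 0 le_rfl]; omega

lemma renameLoopA_eq (l : List Char) : ∀ (acc : List Char) (n : Int),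
    renameLoopA l acc n = acc ++ (splitA l).headI ++ joinTail n (splitA l).tail := by
  induction l with
  | nil => intro acc n; simp [renameLoopA, splitA, joinTail]
  | cons c cs ih =>
    intro acc n
    rcases h : splitA cs with _ | ⟨p, ps⟩
    · exact absurd h (splitA_ne_nil cs)
    · by_cases hc : c = 'A'
      · subst hc
        simp only [renameLoopA, splitA, h]
        rw [ih]
        simp [h, joinTail]
      · simp only [renameLoopA, splitA, h, if_neg hc]
        rw [ih]
        simp [h]

-- ===== VERDICT (by name: the statement is the Claim_ definition above) =====
theorem rename_ai_spec : Claim_equal_rename_ai := by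
  intro formula _
  unfold Spec_rename_ai rename_ai rename_ai_alt
  simp only [strcount_A, length_splitA]
  by_cases h : formula.toList.count 'A' = 0
  · rw [if_neg (by simp [h]), if_pos (by simp [h])]
    exact Prod.ext rfl (by push_cast; omega)
  · rw [if_pos (by positivity), if_neg (by push_cast; omega)]
    refine Prod.ext ?_ (by push_cast; omega)
    simp only
    rw [renameLoopA_eq]
    simp
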